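-- pv_equiv track=rewrite | github.com/OpenBlatam/IA-Models-Clone | Frontier-Model-run/scripts/TruthGPT-main/optimization_core/test_framework/test_runner_edge.py | prioritize_edge_tests
-- ===== SOURCE A (Python) =====
-- from typing import Dict, List, Any, Optional, Tuple, Callable
--
-- def prioritize_edge_tests(categorized_tests: Dict[str, List[Any]]) -> List[Any]:
--     """Prioritize tests with edge computing intelligence."""
--     priority_order = [
--         'edge_node',
--         'iot_device',
--         'fog_computing',
--         'edge_analytics',
--         'edge_ml',
--         'edge_security',
--         'edge_networking',
--         'edge_storage',
--         'edge_optimization',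
--         'edge_scalability',
--         'classical'
--     ]
--
--     prioritized_tests = []
--
--     # Add edge computing tests first
--     for category in priority_order:
--         if category in categorized_tests:
--             prioritized_tests.extend(categorized_tests[category])
--
--     return prioritized_tests
-- ===== SOURCE B (Python) =====
-- def prioritize_edge_tests(categorized_tests):
--     """Prioritize tests with edge computing intelligence."""
--     priority_order = [
--         'edge_node',
--         'iot_device',
--         'fog_computing',
--         'edge_analytics',
--         'edge_ml',
--         'edge_security',
--         'edge_networking',
--         'edge_storage',
--         'edge_optimization',
--         'edge_scalability',
--         'classical'
--     ]
--     rank = {cat: i for i, cat in enumerate(priority_order)}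
--     present = sorted(
--         ((rank[cat], tests) for cat, tests in categorized_tests.items() if cat in rank),
--         key=lambda item: item[0],
--     )
--     out = []
--     for _, tests in present:
--         out.extend(tests)
--     return out
-- ===== Notes on version B (the rewrite author's own statement) =====
-- stated objective: alternative
-- what changed: B builds a rank table from the priority list once, filters the dict's items to ranked categories, sorts those items by rank and concatenates, instead of scanning the fixed priority list and looking each category up in the dict.
import Mathlib
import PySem

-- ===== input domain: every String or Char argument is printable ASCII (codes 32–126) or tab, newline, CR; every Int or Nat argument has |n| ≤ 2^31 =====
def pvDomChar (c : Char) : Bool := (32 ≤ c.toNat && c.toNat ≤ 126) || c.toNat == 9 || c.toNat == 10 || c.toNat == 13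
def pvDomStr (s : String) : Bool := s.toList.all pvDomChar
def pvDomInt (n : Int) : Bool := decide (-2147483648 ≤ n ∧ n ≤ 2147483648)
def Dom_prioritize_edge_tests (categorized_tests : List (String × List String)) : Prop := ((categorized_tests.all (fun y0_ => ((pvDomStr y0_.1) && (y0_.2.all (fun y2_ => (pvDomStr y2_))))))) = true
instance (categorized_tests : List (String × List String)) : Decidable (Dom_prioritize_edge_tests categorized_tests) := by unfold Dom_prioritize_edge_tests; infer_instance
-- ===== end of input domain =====

-- B replaces A's scan of the fixed priority list (one dict lookup per category) by a rank
-- table built from the priority list, a filter of the dict's items and a sort by rank.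

-- ===== PORT A =====
def pvOrder : List String :=
  ["edge_node", "iot_device", "fog_computing", "edge_analytics", "edge_ml",
   "edge_security", "edge_networking", "edge_storage", "edge_optimization",
   "edge_scalability", "classical"]

def prioritize_edge_tests (categorized_tests : List (String × List String)) : List String :=
  pvOrder.foldl (fun prioritized category =>
    match (PySem.Dict.mk categorized_tests).get? category with
    | some tests => prioritized ++ tests
    | none => prioritized) []

-- ===== PORT B =====
def pvRank : PySem.Dict String Int :=
  (PySem.List.enumerate pvOrder 0).foldl (fun d ic => d.insert ic.2 ic.1) PySem.Dict.empty

def prioritize_edge_tests_alt (categorized_tests : List (String × List String)) : List String :=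
  let present := categorized_tests.filterMap (fun p => (pvRank.get? p.1).map (fun r => (r, p.2)))
  (PySem.List.sorted present (fun item => item.1) false).foldl (fun out item => out ++ item.2) []

-- ===== PRECONDITION & SPEC =====
-- Pre_ excludes association lists with duplicate keys: A's parameter is a Python dict, whose
-- keys are always distinct, so such lists do not represent any input of the Python programs.
def Pre_prioritize_edge_tests (categorized_tests : List (String × List String)) : Prop :=
  (categorized_tests.map Prod.fst).Nodup
instance (categorized_tests : List (String × List String)) : Decidable (Pre_prioritize_edge_tests categorized_tests) := by unfold Pre_prioritize_edge_tests; infer_instance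

def pvWitness_prioritize_edge_tests : (List (String × List String)) :=
  [("classical", ["t1", "t2"]), ("edge_ml", ["t3"]), ("misc", ["t4"])]

def Spec_prioritize_edge_tests (categorized_tests : List (String × List String)) (out : List String) : Prop := out = prioritize_edge_tests_alt categorized_tests
instance (categorized_tests : List (String × List String)) (out : List String) : Decidable (Spec_prioritize_edge_tests categorized_tests out) := by unfold Spec_prioritize_edge_tests; infer_instance

-- ===== CLAIM (what is proved, stated in full; the proofs are below) =====
def Claim_equal_prioritize_edge_tests : Prop := ∀ (categorized_tests : List (String × List String)), Dom_prioritize_edge_tests categorized_tests → Pre_prioritize_edge_tests categorized_tests → Spec_prioritize_edge_tests categorized_tests (prioritize_edge_tests categorized_tests)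

-- ===== LEMMAS AND PROOFS =====

-- rank table built from `enumerate order s` (pvRank = pvRankFrom 0 pvOrder)
def pvRankFrom (s : Int) (order : List String) : PySem.Dict String Int :=
  (PySem.List.enumerate order s).foldl (fun d ic => d.insert ic.2 ic.1) PySem.Dict.empty

-- the priority-ordered selection: entries of `enumerate order s` whose category the lookup hits
def pvSel (lk : String → Option (List String)) (s : Int) (order : List String) :
    List (Int × List String) :=
  (PySem.List.enumerate order s).filterMap (fun ic => (lk ic.2).map (fun v => (ic.1, v)))

theorem pvRank_eq : pvRank = pvRankFrom 0 pvOrder := rfl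

theorem pvOrder_nodup : pvOrder.Nodup := by decide

theorem lookup_none {cts : List (String × List String)} {c : String}
    (h : c ∉ cts.map Prod.fst) : (PySem.Dict.mk cts).get? c = none := by
  induction cts with
  | nil => rfl
  | cons p rest ih =>
    simp only [List.map_cons, List.mem_cons, not_or] at h
    rw [PySem.Dict.get?_mk_cons]
    rw [if_neg (fun hh => h.1 ((beq_iff_eq.mp hh).symm))]
    exact ih h.2

-- flattening the selection in enumerate order IS A's concatenation over the priority list
theorem sel_flatMap (lk : String → Option (List String)) (s : Int) (order : List String) :
    (pvSel lk s order).flatMap Prod.snd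
      = order.flatMap (fun c => (lk c).getD []) := by
  induction order generalizing s with
  | nil => rfl
  | cons o rest ih =>
    simp only [pvSel, PySem.List.enumerate_cons, List.filterMap_cons, List.flatMap_cons]
    cases h : lk o with
    | none => simpa [h] using ih (s + 1)
    | some v => simp only [pvSel] at ih ⊢; simp [ih (s + 1)]

-- the selection is strictly increasing in its rank component
theorem sel_pairwise (lk : String → Option (List String)) (s : Int) (order : List String) :
    (pvSel lk s order).Pairwise (fun a b => a.1 < b.1) := by
  rw [pvSel, List.pairwise_filterMap]
  refine (PySem.List.pairwise_lt_enumerate order s).imp ?_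
  rintro a b hab x hx y hy
  simp only [Option.map_eq_some_iff] at hx hy
  obtain ⟨v1, h1, rfl⟩ := hx
  obtain ⟨v2, h2, rfl⟩ := hy
  exact hab

theorem get?_foldl_ins_not_mem (E : List (Int × String)) (d : PySem.Dict String Int)
    (c : String) (h : c ∉ E.map Prod.snd) :
    (E.foldl (fun d ic => d.insert ic.2 ic.1) d).get? c = d.get? c := by
  induction E generalizing d with
  | nil => rfl
  | cons e E ih =>
    simp only [List.map_cons, List.mem_cons, not_or] at h
    rw [List.foldl_cons, ih _ h.2, PySem.Dict.get?_insert_of_ne _ _ h.1]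

theorem get?_foldl_ins_congr (E : List (Int × String)) (d₁ d₂ : PySem.Dict String Int)
    (c : String) (h : d₁.get? c = d₂.get? c) :
    (E.foldl (fun d ic => d.insert ic.2 ic.1) d₁).get? c
      = (E.foldl (fun d ic => d.insert ic.2 ic.1) d₂).get? c := by
  induction E generalizing d₁ d₂ with
  | nil => exact h
  | cons e E ih =>
    refine ih _ _ ?_
    by_cases hc : c = e.2
    · subst hc; rw [PySem.Dict.get?_insert_self, PySem.Dict.get?_insert_self]
    · rw [PySem.Dict.get?_insert_of_ne _ _ hc, PySem.Dict.get?_insert_of_ne _ _ hc, h]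

-- adding one fresh dict entry (c, ts) adds exactly the element (rank c, ts) to the selection
theorem sel_step (lk : String → Option (List String)) (c : String) (ts : List String)
    (hnone : lk c = none) (s : Int) (order : List String) (hord : order.Nodup) :
    (pvSel (fun x => if c == x then some ts else lk x) s order).Perm
      ((((pvRankFrom s order).get? c).map (fun r => (r, ts))).toList ++ pvSel lk s order) := by
  induction order generalizing s with
  | nil => simp [pvSel, pvRankFrom, PySem.List.enumerate_nil, PySem.Dict.get?_empty]
  | cons o order ih =>
    obtain ⟨ho, hord⟩ := List.nodup_cons.mp hord
    have hrk : pvRankFrom s (o :: order)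
        = (PySem.List.enumerate order (s+1)).foldl (fun d ic => d.insert ic.2 ic.1)
            (PySem.Dict.empty.insert o s) := by
      simp [pvRankFrom, PySem.List.enumerate_cons]
    by_cases hco : c = o
    · subst hco
      have h1 : (pvRankFrom s (c :: order)).get? c = some s := by
        rw [hrk, get?_foldl_ins_not_mem _ _ _ (by rw [PySem.List.map_snd_enumerate]; exact ho),
          PySem.Dict.get?_insert_self]
      have h2 : pvSel (fun x => if c == x then some ts else lk x) s (c :: order)
          = (s, ts) :: pvSel lk (s+1) order := by
        simp only [pvSel, PySem.List.enumerate_cons, List.filterMap_cons, beq_self_eq_true,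
          if_true, Option.map_some]
        congr 1
        refine List.filterMap_congr ?_
        intro ic hic
        have : ic.2 ∈ order := by
          have := PySem.List.map_snd_enumerate (α := String) order (s+1)
          exact this ▸ List.mem_map_of_mem hic
        rw [if_neg (by simp; rintro rfl; exact ho this)]
      have h3 : pvSel lk s (c :: order) = pvSel lk (s+1) order := by
        simp [pvSel, PySem.List.enumerate_cons, hnone]
      rw [h1, h2, h3]
      exact List.Perm.refl _
    · have h1 : (pvRankFrom s (o :: order)).get? c = (pvRankFrom (s+1) order).get? c := by
        rw [hrk, pvRankFrom]
        refine get?_foldl_ins_congr _ _ _ _ ?_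
        rw [PySem.Dict.get?_insert_of_ne _ _ hco]
      have h2 : pvSel (fun x => if c == x then some ts else lk x) s (o :: order)
          = ((lk o).map (fun v => (s, v))).toList
              ++ pvSel (fun x => if c == x then some ts else lk x) (s+1) order := by
        simp only [pvSel, PySem.List.enumerate_cons, List.filterMap_cons]
        rw [if_neg (by simpa using hco)]
        cases lk o <;> simp
      have h3 : pvSel lk s (o :: order)
          = ((lk o).map (fun v => (s, v))).toList ++ pvSel lk (s+1) order := by
        simp only [pvSel, PySem.List.enumerate_cons, List.filterMap_cons]
        cases lk o <;> simp
      rw [h1, h2, h3]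
      calc ((lk o).map (fun v => (s, v))).toList
            ++ pvSel (fun x => if c == x then some ts else lk x) (s+1) order
          |>.Perm (((lk o).map (fun v => (s, v))).toList
            ++ ((((pvRankFrom (s+1) order).get? c).map (fun r => (r, ts))).toList
              ++ pvSel lk (s+1) order)) := List.Perm.append_left _ (ih (s+1) hord)
        _ |>.Perm _ := by
          rw [← List.append_assoc, ← List.append_assoc]
          exact List.Perm.append_right _ (List.perm_append_comm)

-- the selection is a rearrangement of B's filtered, rank-annotated dict items
theorem sel_perm (cts : List (String × List String)) (s : Int) (order : List String)
    (hord : order.Nodup) (hk : (cts.map Prod.fst).Nodup) :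
    (pvSel (fun x => (PySem.Dict.mk cts).get? x) s order).Perm
      (cts.filterMap (fun p => ((pvRankFrom s order).get? p.1).map (fun r => (r, p.2)))) := by
  induction cts with
  | nil =>
    have hz : ∀ x, (PySem.Dict.mk ([] : List (String × List String))).get? x = none :=
      fun x => lookup_none (by simp)
    simp [pvSel, hz]
  | cons p rest ih =>
    obtain ⟨c, ts⟩ := p
    simp only [List.map_cons, List.nodup_cons] at hk
    have hnone : (PySem.Dict.mk rest).get? c = none := lookup_none hk.1
    have hfn : (pvSel (fun x => (PySem.Dict.mk ((c, ts) :: rest)).get? x) s order)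
        = pvSel (fun x => if c == x then some ts else (PySem.Dict.mk rest).get? x) s order := by
      simp only [pvSel, PySem.Dict.get?_mk_cons]
    rw [hfn]
    refine (sel_step _ c ts hnone s order hord).trans ?_
    have hrhs : (((c, ts) :: rest).filterMap
          (fun p => ((pvRankFrom s order).get? p.1).map (fun r => (r, p.2))))
        = (((pvRankFrom s order).get? c).map (fun r => (r, ts))).toList
          ++ rest.filterMap (fun p => ((pvRankFrom s order).get? p.1).map (fun r => (r, p.2))) := by
      rw [List.filterMap_cons]
      cases (pvRankFrom s order).get? c <;> simp
    rw [hrhs]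
    exact List.Perm.append_left _ (ih hk.2)

-- A's loop is the concatenation over the priority list
theorem A_flatMap (cts : List (String × List String)) :
    prioritize_edge_tests cts
      = pvOrder.flatMap (fun c => ((PySem.Dict.mk cts).get? c).getD []) := by
  rw [prioritize_edge_tests]
  rw [PySem.List.foldl_congr_mem pvOrder _
      (fun acc x => acc ++ ((PySem.Dict.mk cts).get? x).getD []) []
      (fun acc x _ => by cases h : (PySem.Dict.mk cts).get? x <;> simp [h])]
  simpa using PySem.List.foldl_append_eq_flatMap
    (fun c => ((PySem.Dict.mk cts).get? c).getD []) pvOrder []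

theorem main_eq (cts : List (String × List String)) (hpre : Pre_prioritize_edge_tests cts) :
    prioritize_edge_tests cts = prioritize_edge_tests_alt cts := by
  have hperm := sel_perm cts 0 pvOrder pvOrder_nodup hpre
  rw [← pvRank_eq] at hperm
  have hsorted : PySem.List.sorted
        (cts.filterMap (fun p => (pvRank.get? p.1).map (fun r => (r, p.2))))
        (fun item => item.1) false
      = pvSel (fun x => (PySem.Dict.mk cts).get? x) 0 pvOrder :=
    PySem.List.sorted_eq_of_perm_of_pairwise_lt _ _ _ hperm (sel_pairwise _ 0 pvOrder)
  rw [A_flatMap, prioritize_edge_tests_alt]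
  rw [hsorted]
  rw [PySem.List.foldl_append_eq_flatMap Prod.snd _ []]
  rw [sel_flatMap]
  rfl

-- ===== VERDICT (by name: the statement is the Claim_ definition above) =====
theorem prioritize_edge_tests_spec : Claim_equal_prioritize_edge_tests := by
  intro cts _ hpre
  exact main_eq cts hpre
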